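-- pv_equiv track=rewrite | github.com/sfa119f/tugas4-kriptografi | function.py | lenValCipher
-- ===== SOURCE A (Python) =====
-- def blockMessage(n):
-- # Value block message dengan panjang n
--   if n == 0: return 0
--   if n == 1: return 10
--   else: return blockMessage(n - 2) * 100 + 25
--
-- def lenValCipher(n):
-- # Menghitung panjang hasil dari cipher text
--   if n < 25:
--     lenVal = 1
--   else:
--     lenVal = 2
--     while blockMessage(lenVal + 2) < n:
--       lenVal += 2
--   return lenVal
-- ===== SOURCE B (Python) =====
-- def lenValCipher(n):
--     # Count length value of cipher by recursion on the message scaled down by one block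
--     if n < 25:
--         return 1
--     if n <= 2525:
--         return 2
--     return 2 + lenValCipher((n + 74) // 100)
-- ===== Notes on version B (the rewrite author's own statement) =====
-- stated objective: simpler
-- what changed: Replaces the search loop that recomputes the recursive blockMessage threshold at every step by a direct recursion on n scaled down by one block ((n+74)//100), with the first two thresholds as base cases.
import Mathlib
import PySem

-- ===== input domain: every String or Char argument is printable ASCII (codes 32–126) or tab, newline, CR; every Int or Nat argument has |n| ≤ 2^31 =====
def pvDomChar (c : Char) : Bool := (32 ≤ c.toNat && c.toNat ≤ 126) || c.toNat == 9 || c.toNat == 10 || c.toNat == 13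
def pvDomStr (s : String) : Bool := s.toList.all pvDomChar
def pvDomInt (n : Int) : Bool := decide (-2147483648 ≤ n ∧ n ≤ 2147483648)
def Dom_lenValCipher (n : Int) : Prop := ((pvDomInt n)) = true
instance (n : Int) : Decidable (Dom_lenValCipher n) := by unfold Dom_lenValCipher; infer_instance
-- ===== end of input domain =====

-- B replaces the search loop that recomputes the recursive blockMessage threshold each step
-- by a direct recursion on n scaled down by one block; objective: simpler.


-- ===== PORT A =====
-- blockMessage: Python recurses on n-2; A only ever calls it on nonnegative arguments,
-- so we port it by structural recursion on a Nat (exact for all n ≥ 0).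
def blockB : Nat → Int
  | 0 => 0
  | 1 => 10
  | (k+2) => blockB k * 100 + 25

theorem blockB_nonneg : ∀ k : Nat, 0 ≤ blockB k := by
  intro k
  induction k using blockB.induct with
  | case1 => simp [blockB]
  | case2 => simp [blockB]
  | case3 k ih => simp only [blockB]; omega

-- the while loop of A; lenVal is always a nonnegative even integer, kept as a Nat
def loopA (n : Int) (lenVal : Nat) : Int :=
  if blockB (lenVal + 2) < n then loopA n (lenVal + 2) else (lenVal : Int)
termination_by (n - blockB (lenVal + 2)).toNat
decreasing_by
  have h1 : blockB (lenVal + 2 + 2) = blockB (lenVal + 2) * 100 + 25 := rfl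
  have h2 := blockB_nonneg (lenVal + 2)
  omega

def lenValCipher (n : Int) : Int :=
  if n < 25 then 1 else loopA n 2

-- ===== PORT B =====
def lenValCipher_alt (n : Int) : Int :=
  if n < 25 then 1
  else if n ≤ 2525 then 2
  else 2 + lenValCipher_alt (PySem.Int.floordiv (n + 74) 100)
termination_by n.toNat
decreasing_by
  rw [PySem.Int.floordiv_eq_ediv_of_pos (by omega : (0:Int) < 100)]
  omega

-- ===== PRECONDITION & SPEC =====
def Spec_lenValCipher (n : Int) (out : Int) : Prop := out = lenValCipher_alt n
instance (n : Int) (out : Int) : Decidable (Spec_lenValCipher n out) := by unfold Spec_lenValCipher; infer_instance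

-- ===== CLAIM (what is proved, stated in full; the proofs are below) =====
def Claim_equal_lenValCipher : Prop := ∀ (n : Int), Dom_lenValCipher n → Spec_lenValCipher n (lenValCipher n)

-- ===== LEMMAS AND PROOFS =====
theorem loopA_unfold (n : Int) (l : Nat) :
    loopA n l = if blockB (l + 2) < n then loopA n (l + 2) else (l : Int) := by
  rw [loopA]

theorem alt_unfold (n : Int) :
    lenValCipher_alt n =
      if n < 25 then 1
      else if n ≤ 2525 then 2
      else 2 + lenValCipher_alt (PySem.Int.floordiv (n + 74) 100) := by
  rw [lenValCipher_alt]

-- characterization of A's loop on the bounded domain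
theorem A_char (n : Int) (h25 : 25 ≤ n) (hub : n ≤ 2147483648) :
    lenValCipher n = if n ≤ 2525 then 2 else if n ≤ 252525 then 4
      else if n ≤ 25252525 then 6 else 8 := by
  have h4 : blockB 4 = 2525 := rfl
  have h6 : blockB 6 = 252525 := rfl
  have h8 : blockB 8 = 25252525 := rfl
  have h10 : blockB 10 = 2525252525 := rfl
  rw [lenValCipher, if_neg (by omega), loopA_unfold, loopA_unfold, loopA_unfold,
    loopA_unfold]
  simp only [show (2:Nat)+2 = 4 from rfl, show (4:Nat)+2 = 6 from rfl,
    show (6:Nat)+2 = 8 from rfl, show (8:Nat)+2 = 10 from rfl, h4, h6, h8, h10]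
  split_ifs
  all_goals try norm_num
  all_goals exfalso; omega

theorem alt2 (n : Int) (h1 : 2525 < n) (h2 : n ≤ 252525) : lenValCipher_alt n = 4 := by
  rw [alt_unfold, if_neg (by omega), if_neg (by omega)]
  rw [PySem.Int.floordiv_eq_ediv_of_pos (by omega : (0:Int) < 100)]
  have hm1 : 25 ≤ (n + 74) / 100 := by omega
  have hm2 : (n + 74) / 100 ≤ 2525 := by omega
  rw [alt_unfold, if_neg (by omega), if_pos (by omega)]; norm_num

theorem alt3 (n : Int) (h1 : 252525 < n) (h2 : n ≤ 25252525) : lenValCipher_alt n = 6 := by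
  rw [alt_unfold, if_neg (by omega), if_neg (by omega)]
  rw [PySem.Int.floordiv_eq_ediv_of_pos (by omega : (0:Int) < 100)]
  have hm1 : 2525 < (n + 74) / 100 := by omega
  have hm2 : (n + 74) / 100 ≤ 252525 := by omega
  rw [alt2 _ hm1 hm2]; norm_num

theorem alt4 (n : Int) (h1 : 25252525 < n) (h2 : n ≤ 2147483648) : lenValCipher_alt n = 8 := by
  rw [alt_unfold, if_neg (by omega), if_neg (by omega)]
  rw [PySem.Int.floordiv_eq_ediv_of_pos (by omega : (0:Int) < 100)]
  have hm1 : 252525 < (n + 74) / 100 := by omega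
  have hm2 : (n + 74) / 100 ≤ 25252525 := by omega
  rw [alt3 _ hm1 hm2]; norm_num

-- ===== VERDICT (by name: the statement is the Claim_ definition above) =====
theorem lenValCipher_spec : Claim_equal_lenValCipher := by
  intro n hdom
  have hub : n ≤ 2147483648 := by
    simp only [Dom_lenValCipher, pvDomInt, decide_eq_true_eq] at hdom; omega
  unfold Spec_lenValCipher
  by_cases h25 : n < 25
  · rw [lenValCipher, if_pos h25, alt_unfold, if_pos h25]
  · rw [A_char n (by omega) hub]
    split_ifs with hb hc hd
    · rw [alt_unfold, if_neg h25, if_pos hb]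
    · rw [alt2 n (by omega) hc]
    · rw [alt3 n (by omega) hd]
    · rw [alt4 n (by omega) hub]
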